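-- pv_equiv track=rewrite | github.com/y9nhjy/Proxifier-Keygen | Proxifier_Checker.py | handle
-- ===== SOURCE A (Python) =====
-- def handle(s):
--     res = 0
--     for i in range(len(s) - 1, -1, -1):
--         res *= 32
--         t = ord(s[i])
--         if s[i] == 'W':
--             continue
--         elif s[i] == 'X':
--             res += 24
--         elif s[i] == 'Y':
--             res += 1
--         elif s[i] == 'Z':
--             res += 18
--         elif s[i] in "0123456789":
--             res += t - 48
--         else:
--             res += t - 55
--     return res
-- ===== SOURCE B (Python) =====
-- def _digit(c):
--     if c == 'W':
--         return 0
--     if c == 'X':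
--         return 24
--     if c == 'Y':
--         return 1
--     if c == 'Z':
--         return 18
--     if c in "0123456789":
--         return ord(c) - 48
--     return ord(c) - 55
--
-- def handle(s):
--     res = 0
--     mult = 1
--     for c in s:
--         res += _digit(c) * mult
--         mult *= 32
--     return res
-- ===== Notes on version B (the rewrite author's own statement) =====
-- stated objective: alternative
-- what changed: Replaces A's backward Horner pass (index loop from the end, repeatedly scaling the accumulator by 32) with a forward single pass over the characters maintaining an explicit place-value multiplier, with the digit decoding factored into a helper.
import Mathlib
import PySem

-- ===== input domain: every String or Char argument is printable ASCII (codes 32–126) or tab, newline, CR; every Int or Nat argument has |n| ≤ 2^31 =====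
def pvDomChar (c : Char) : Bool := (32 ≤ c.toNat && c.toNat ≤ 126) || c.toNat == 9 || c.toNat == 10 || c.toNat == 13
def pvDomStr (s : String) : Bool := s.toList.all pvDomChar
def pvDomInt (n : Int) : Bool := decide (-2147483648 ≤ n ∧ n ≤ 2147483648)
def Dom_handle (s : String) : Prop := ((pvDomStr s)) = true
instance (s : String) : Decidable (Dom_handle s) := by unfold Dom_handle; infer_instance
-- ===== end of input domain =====

-- B replaces A's backward Horner pass with a forward pass keeping an explicit place-value multiplier (alternative decomposition, same cost).


-- ===== PORT A =====
-- A iterates indices len-1 down to 0, i.e. the characters back to front, doing res := res*32 + branch.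
def handle (s : String) : Int :=
  s.toList.reverse.foldl (fun res c =>
    let res := res * 32
    let t : Int := (c.toNat : Int)
    if c = 'W' then res
    else if c = 'X' then res + 24
    else if c = 'Y' then res + 1
    else if c = 'Z' then res + 18
    else if ("0123456789".toList.contains c) then res + (t - 48)
    else res + (t - 55)) 0

-- ===== PORT B =====
def pvDigit (c : Char) : Int :=
  if c = 'W' then 0
  else if c = 'X' then 24
  else if c = 'Y' then 1
  else if c = 'Z' then 18
  else if ("0123456789".toList.contains c) then (c.toNat : Int) - 48
  else (c.toNat : Int) - 55

def handle_alt (s : String) : Int :=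
  (s.toList.foldl (fun (p : Int × Int) c => (p.1 + pvDigit c * p.2, p.2 * 32)) (0, 1)).1

-- ===== PRECONDITION & SPEC =====
def Spec_handle (s : String) (out : Int) : Prop := out = handle_alt s
instance (s : String) (out : Int) : Decidable (Spec_handle s out) := by unfold Spec_handle; infer_instance

-- ===== CLAIM (what is proved, stated in full; the proofs are below) =====
def Claim_equal_handle : Prop := ∀ (s : String), Dom_handle s → Spec_handle s (handle s)

-- ===== LEMMAS AND PROOFS =====

-- little-endian base-32 value, the common characterisation of both ports
def pvHorner : List Char → Int
  | [] => 0
  | c :: l => pvDigit c + 32 * pvHorner l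

theorem pvStepA_eq :
    (fun (res : Int) (c : Char) =>
      let res := res * 32
      let t : Int := (c.toNat : Int)
      if c = 'W' then res
      else if c = 'X' then res + 24
      else if c = 'Y' then res + 1
      else if c = 'Z' then res + 18
      else if ("0123456789".toList.contains c) then res + (t - 48)
      else res + (t - 55)) = fun r c => r * 32 + pvDigit c := by
  funext r c
  simp only [pvDigit]
  split_ifs <;> ring

theorem pvA_eq (l : List Char) :
    l.reverse.foldl (fun r c => r * 32 + pvDigit c) 0 = pvHorner l := by
  induction l with
  | nil => rfl
  | cons c l ih =>
    simp only [List.reverse_cons, List.foldl_append, List.foldl_cons, List.foldl_nil, ih, pvHorner]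
    ring

theorem pvB_eq (l : List Char) (res mult : Int) :
    (l.foldl (fun (p : Int × Int) c => (p.1 + pvDigit c * p.2, p.2 * 32)) (res, mult)).1
      = res + mult * pvHorner l := by
  induction l generalizing res mult with
  | nil => simp [pvHorner]
  | cons c l ih => simp only [List.foldl_cons, ih, pvHorner]; ring

-- ===== VERDICT (by name: the statement is the Claim_ definition above) =====
theorem handle_spec : Claim_equal_handle := by
  intro s _
  unfold Spec_handle handle handle_alt
  rw [pvStepA_eq, pvA_eq, pvB_eq]
  ring
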